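-- pv_equiv track=rewrite | github.com/Sulynn7/Python_Practice | 9. Text Files/9.4 Dobble.py | symbol2cards
-- ===== SOURCE A (Python) =====
-- def symbol2cards(c2s):
--     """
--     >>> c2s = card2symbols('cards.txt')
--     >>> s2c = symbol2cards(c2s)
--     >>> s2c['snowman']
--     {1, 2, 3, 4, 6, 8, 11}
--     >>> s2c['ice cube']
--     {1, 2, 3, 5, 9, 11, 12}
--     >>> s2c['zebra']
--     {2, 3, 4, 5, 6, 7, 8}
--     """
--
--     keyword = []
--     value_number = []
--     s2c = {}
--     for key, value in c2s.items():
--         for word in value: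
--             keyword.append(word)
--
--     for i in set(keyword):
--         for key, value in c2s.items():
--             if i in value:
--                 value_number.append(key)
--
--         s2c[i] = set(value_number)
--         value_number = []
--     return s2c
-- ===== SOURCE B (Python) =====
-- def symbol2cards(c2s):
--     # Single pass over all (card, symbol) pairs, building the inverted index
--     # directly: O(total number of symbol occurrences) instead of a rescan of
--     # every card for every distinct symbol.
--     s2c = {}
--     for key, value in c2s.items():
--         for word in value:
--             s2c.setdefault(word, set()).add(key)
--     return s2c
-- ===== Notes on version B (the rewrite author's own statement) =====
-- stated objective: faster
-- what changed: Instead of collecting all symbols and then rescanning every card for each distinct symbol, B makes one pass over the (card, symbols) pairs and inserts each card id into the symbol's set as it is seen (inverted index built incrementally).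
import Mathlib
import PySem

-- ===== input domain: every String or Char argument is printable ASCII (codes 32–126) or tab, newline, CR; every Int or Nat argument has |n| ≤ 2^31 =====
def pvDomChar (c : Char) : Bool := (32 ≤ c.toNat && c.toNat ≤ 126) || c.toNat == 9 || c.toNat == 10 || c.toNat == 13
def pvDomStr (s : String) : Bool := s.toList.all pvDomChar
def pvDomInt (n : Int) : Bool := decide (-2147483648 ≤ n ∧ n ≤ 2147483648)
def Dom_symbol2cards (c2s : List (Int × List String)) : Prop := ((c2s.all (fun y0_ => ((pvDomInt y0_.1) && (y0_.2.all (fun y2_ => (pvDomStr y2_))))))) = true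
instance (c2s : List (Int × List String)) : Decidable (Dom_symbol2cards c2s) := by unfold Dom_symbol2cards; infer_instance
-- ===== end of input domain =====

-- B builds the inverted index in one pass over the (card, symbols) pairs instead of
-- rescanning every card for each distinct symbol.  A's returned dict is keyed in Python's
-- hash-dependent set-iteration order; dict outputs are compared ignoring key order, and the
-- port of A uses first-occurrence order for set(keyword).

-- ===== PORT A =====
def symbol2cards (c2s : List (Int × List String)) : List (String × List Int) :=
  let keyword := c2s.foldl (fun acc kv => kv.2.foldl (fun a w => a ++ [w]) acc) []
  ((PySem.Set.ofList keyword).foldl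
    (fun s2c i =>
      let value_number :=
        c2s.foldl (fun vn kv => if kv.2.contains i then vn ++ [kv.1] else vn) []
      s2c.insert i (PySem.Set.ofList value_number))
    PySem.Dict.empty).items

-- ===== PORT B =====
def symbol2cards_alt (c2s : List (Int × List String)) : List (String × List Int) :=
  (c2s.foldl
    (fun d kv => kv.2.foldl (fun d w => d.modify w [] (fun s => PySem.Set.add s kv.1)) d)
    PySem.Dict.empty).items

-- ===== PRECONDITION & SPEC =====
def Spec_symbol2cards (c2s : List (Int × List String)) (out : List (String × List Int)) : Prop := out = symbol2cards_alt c2s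
instance (c2s : List (Int × List String)) (out : List (String × List Int)) : Decidable (Spec_symbol2cards c2s out) := by unfold Spec_symbol2cards; infer_instance

-- ===== CLAIM (what is proved, stated in full; the proofs are below) =====
def Claim_equal_symbol2cards : Prop := ∀ (c2s : List (Int × List String)), Dom_symbol2cards c2s → Spec_symbol2cards c2s (symbol2cards c2s)

-- ===== LEMMAS AND PROOFS =====

-- a dict whose items are the keys L tagged by the value function S
def mkd (L : List String) (S : String → List Int) : PySem.Dict String (List Int) :=
  ⟨L.map (fun w => (w, S w))⟩

-- the flattened symbol list and the deduped ids of the cards containing w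
def flatSyms (c2s : List (Int × List String)) : List String := c2s.flatMap (fun kv => kv.2)

def cardsOf (c2s : List (Int × List String)) (w : String) : List Int :=
  PySem.Set.ofList ((c2s.filter (fun kv => kv.2.contains w)).map (fun kv => kv.1))

theorem dict_ext (d d' : PySem.Dict String (List Int)) (h : d.items = d'.items) : d = d' := by
  cases d; cases d'; cases h; rfl

theorem items_mkd (L : List String) (S : String → List Int) :
    (mkd L S).items = L.map (fun w => (w, S w)) := rfl

theorem mkd_congr (L : List String) (S S' : String → List Int)
    (h : ∀ w ∈ L, S w = S' w) : mkd L S = mkd L S' := by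
  unfold mkd
  congr 1
  exact List.map_congr_left (fun w hw => by rw [h w hw])

theorem keys_mkd (L : List String) (S : String → List Int) : (mkd L S).keys = L := by
  simp [mkd, PySem.Dict.keys, Function.comp_def]

theorem contains_mkd (L : List String) (S : String → List Int) (w : String) :
    (mkd L S).contains w = decide (w ∈ L) := by
  rw [PySem.Dict.contains_eq_decide_mem_keys, keys_mkd]

theorem getD_mkd (L : List String) (S : String → List Int) (hL : L.Nodup)
    (w : String) (hw : w ∈ L) (d0 : List Int) : (mkd L S).getD w d0 = S w :=
  PySem.Dict.getD_of_mem_items (mkd L S) (List.mem_map_of_mem hw)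
    (by rw [keys_mkd]; exact hL) d0

theorem insert_mkd_mem (L : List String) (S : String → List Int) (w : String)
    (hw : w ∈ L) (v : List Int) :
    (mkd L S).insert w v = mkd L (fun w' => if w' = w then v else S w') := by
  apply dict_ext
  rw [PySem.Dict.items_insert, contains_mkd]
  simp only [hw, decide_true, if_true, items_mkd]
  rw [List.map_map]
  apply List.map_congr_left
  intro x _
  by_cases hx : x = w <;> simp [hx]

theorem insert_mkd_not_mem (L : List String) (S : String → List Int) (w : String)
    (hw : w ∉ L) (v : List Int) :
    (mkd L S).insert w v = mkd (L ++ [w]) (fun w' => if w' = w then v else S w') := by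
  apply dict_ext
  rw [PySem.Dict.items_insert, contains_mkd]
  simp only [hw, decide_false, Bool.false_eq_true, if_false, items_mkd]
  rw [List.map_append]
  congr 1
  · apply List.map_congr_left
    intro x hx
    have hx' : x ≠ w := fun h => hw (h ▸ hx)
    simp [hx']
  · simp

-- A's outer loop over the deduped symbol list, inserting fresh keys, builds mkd
theorem foldl_insert_eq_mkd (g : String → List Int) (L : List String) (hL : L.Nodup) :
    L.foldl (fun d i => d.insert i (g i)) PySem.Dict.empty = mkd L g := by
  induction L using List.reverseRecOn with
  | nil => rfl
  | append_singleton L x ih =>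
      have hnd : L.Nodup := (List.nodup_append.mp hL).1
      have hx : x ∉ L := fun hmem =>
        (List.nodup_append.mp hL).2.2 x hmem x (List.mem_singleton_self x) rfl
      rw [List.foldl_append, ih hnd]
      simp only [List.foldl_cons, List.foldl_nil]
      rw [insert_mkd_not_mem L g x hx]
      apply mkd_congr
      intro w hw
      by_cases h : w = x <;> simp [h]

-- B's inner loop (one card: id k, symbol list ws) on a dict of shape mkd
theorem foldl_modify_mkd (k : Int) (ws : List String) (L : List String)
    (S : String → List Int) (hL : L.Nodup) :
    ws.foldl (fun d w => d.modify w [] (fun s => PySem.Set.add s k)) (mkd L S)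
      = mkd (PySem.Set.update L ws)
          (fun w => if w ∈ ws then PySem.Set.add (if w ∈ L then S w else []) k else S w) := by
  induction ws using List.reverseRecOn with
  | nil =>
      rw [PySem.Set.update_nil]
      apply mkd_congr
      intro w _
      exact (if_neg (fun h => nomatch h)).symm
  | append_singleton ws x ih =>
      rw [List.foldl_append, ih]
      simp only [List.foldl_cons, List.foldl_nil]
      unfold PySem.Dict.modify
      have hnd : (PySem.Set.update L ws).Nodup := PySem.Set.nodup_update L ws hL
      by_cases hx : x ∈ PySem.Set.update L ws
      · rw [getD_mkd _ _ hnd x hx, insert_mkd_mem _ _ _ hx]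
        have hupd : PySem.Set.update L (ws ++ [x]) = PySem.Set.update L ws := by
          rw [PySem.Set.update_append, PySem.Set.update_cons, PySem.Set.update_nil,
            PySem.Set.add_of_mem hx]
        rw [hupd]
        apply mkd_congr
        intro w _
        by_cases hwx : w = x
        · subst hwx
          have hmem : w ∈ ws ++ [w] := by simp
          rw [if_pos rfl, if_pos hmem]
          by_cases hws : w ∈ ws
          · rw [if_pos hws]
            exact PySem.Set.add_of_mem ((PySem.Set.mem_add _ _ _).mpr (Or.inr rfl))
          · have hwL : w ∈ L := ((PySem.Set.mem_update L ws w).mp hx).resolve_right hws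
            rw [if_neg hws, if_pos hwL]
        · simp only [hwx, if_false]
          by_cases hws : w ∈ ws <;> simp [hws, List.mem_append, hwx]
      · rw [PySem.Dict.getD_of_not_contains _ [] (by rw [contains_mkd]; simp [hx]),
          insert_mkd_not_mem _ _ _ hx]
        have hupd : PySem.Set.update L (ws ++ [x]) = PySem.Set.update L ws ++ [x] := by
          rw [PySem.Set.update_append, PySem.Set.update_cons, PySem.Set.update_nil,
            PySem.Set.add_of_not_mem hx]
        rw [hupd]
        apply mkd_congr
        intro w _
        by_cases hwx : w = x
        · subst hwx
          have hws : w ∉ ws := fun h => hx ((PySem.Set.mem_update L ws w).mpr (Or.inr h))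
          have hwL : w ∉ L := fun h => hx ((PySem.Set.mem_update L ws w).mpr (Or.inl h))
          have hmem : w ∈ ws ++ [w] := by simp
          rw [if_pos rfl, if_pos hmem, if_neg hwL]
        · simp only [hwx, if_false]
          by_cases hws : w ∈ ws <;> simp [hws, List.mem_append, hwx]

-- a symbol occurring in no card has an empty card set
theorem cardsOf_of_not_mem (c2s : List (Int × List String)) (w : String)
    (hw : w ∉ flatSyms c2s) : cardsOf c2s w = [] := by
  unfold cardsOf
  have h : c2s.filter (fun kv => kv.2.contains w) = [] := by
    rw [List.filter_eq_nil_iff]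
    intro kv hkv hc
    exact hw (List.mem_flatMap.mpr ⟨kv, hkv, List.contains_iff_mem.mp hc⟩)
  rw [h]; rfl

-- B's whole fold builds the inverted index mkd (dedup of all symbols) (cardsOf)
theorem alt_fold_eq_mkd (c2s : List (Int × List String)) :
    c2s.foldl
      (fun d kv => kv.2.foldl (fun d w => d.modify w [] (fun s => PySem.Set.add s kv.1)) d)
      PySem.Dict.empty
      = mkd (PySem.Set.ofList (flatSyms c2s)) (cardsOf c2s) := by
  induction c2s using List.reverseRecOn with
  | nil => rfl
  | append_singleton c2s c ih =>
      rw [List.foldl_append, ih]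
      simp only [List.foldl_cons, List.foldl_nil]
      rw [foldl_modify_mkd c.1 c.2 _ _ (PySem.Set.nodup_ofList _)]
      have hflat : flatSyms (c2s ++ [c]) = flatSyms c2s ++ c.2 := by
        simp [flatSyms]
      rw [hflat, PySem.Set.ofList_append]
      apply mkd_congr
      intro w _
      have hcards : cardsOf (c2s ++ [c]) w =
          if w ∈ c.2 then PySem.Set.add (cardsOf c2s w) c.1 else cardsOf c2s w := by
        unfold cardsOf
        rw [List.filter_append, List.map_append]
        by_cases hwc : w ∈ c.2
        · simp only [List.filter_cons, List.filter_nil, List.contains_iff_mem,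
            hwc, if_true, List.map_cons, List.map_nil]
          exact PySem.Set.ofList_append_singleton _ _
        · simp [hwc]
      rw [hcards]
      by_cases hwc : w ∈ c.2
      · simp only [hwc, if_true]
        by_cases hwf : w ∈ PySem.Set.ofList (flatSyms c2s)
        · simp [hwf]
        · have hnf : w ∉ flatSyms c2s :=
            fun h => hwf ((PySem.Set.mem_ofList (flatSyms c2s) w).mpr h)
          simp [hwf, cardsOf_of_not_mem c2s w hnf]
      · simp [hwc]

-- ===== VERDICT (by name: the statement is the Claim_ definition above) =====
theorem symbol2cards_spec : Claim_equal_symbol2cards := by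
  intro c2s _
  unfold Spec_symbol2cards symbol2cards symbol2cards_alt
  rw [alt_fold_eq_mkd]
  have hkw : c2s.foldl (fun acc kv => kv.2.foldl (fun a w => a ++ [w]) acc) ([] : List String)
      = flatSyms c2s := by
    have h1 : c2s.foldl (fun acc kv => kv.2.foldl (fun a w => a ++ [w]) acc) ([] : List String)
        = c2s.foldl (fun acc kv => acc ++ kv.2) [] :=
      PySem.List.foldl_congr_mem c2s _ _ []
        (fun acc kv _ => PySem.List.foldl_append_singleton kv.2 acc)
    rw [h1]
    simpa [flatSyms] using
      PySem.List.foldl_append_eq_flatMap (fun kv : Int × List String => kv.2) c2s []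
  rw [hkw]
  have h2 : ∀ i : String,
      c2s.foldl (fun vn kv => if kv.2.contains i then vn ++ [kv.1] else vn) [] =
        (c2s.filter (fun kv => kv.2.contains i)).map (fun kv => kv.1) := by
    intro i
    simpa using PySem.List.foldl_append_if (fun kv => kv.2.contains i) (fun kv => kv.1) c2s []
  have h3 : ((PySem.Set.ofList (flatSyms c2s)).foldl
      (fun s2c i =>
        s2c.insert i (PySem.Set.ofList
          (c2s.foldl (fun vn kv => if kv.2.contains i then vn ++ [kv.1] else vn) [])))
      PySem.Dict.empty)
      = mkd (PySem.Set.ofList (flatSyms c2s)) (cardsOf c2s) := by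
    have h4 : (fun (s2c : PySem.Dict String (List Int)) (i : String) =>
        s2c.insert i (PySem.Set.ofList
          (c2s.foldl (fun vn kv => if kv.2.contains i then vn ++ [kv.1] else vn) [])))
        = fun s2c i => s2c.insert i (cardsOf c2s i) := by
      funext s2c i
      rw [h2 i]
      rfl
    rw [h4]
    exact foldl_insert_eq_mkd (cardsOf c2s) _ (PySem.Set.nodup_ofList _)
  show ((PySem.Set.ofList (flatSyms c2s)).foldl
      (fun s2c i =>
        s2c.insert i (PySem.Set.ofList
          (c2s.foldl (fun vn kv => if kv.2.contains i then vn ++ [kv.1] else vn) [])))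
      PySem.Dict.empty).items
      = (mkd (PySem.Set.ofList (flatSyms c2s)) (cardsOf c2s)).items
  exact congrArg PySem.Dict.items h3
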